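-- pv_equiv track=rewrite | github.com/LliliLlooping/CMU_02604BioinformaticsAlgorithms | Week3/CyclopeptideSequencing.py | Consistent
-- ===== SOURCE A (Python) =====
-- def Consistent(cycloSpectrum, spectrum):
--     cSpecCount = {s: cycloSpectrum.count(s) for s in set(cycloSpectrum)}
--     specCount = {s: spectrum.count(s) for s in set(spectrum)}
--     uniqueSpectrum = set(specCount.keys())
--     for cSpec in cSpecCount.keys():
--         if cSpec not in uniqueSpectrum or cSpecCount[cSpec] > specCount[cSpec]:
--             return False
--     return True
-- ===== SOURCE B (Python) =====
-- def Consistent(cycloSpectrum, spectrum):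
--     sc = sorted(cycloSpectrum)
--     ss = sorted(spectrum)
--     i = j = 0
--     n, m = len(sc), len(ss)
--     while i < n:
--         x = sc[i]
--         while j < m and ss[j] < x:
--             j += 1
--         if j == m or ss[j] != x:
--             return False
--         i += 1
--         j += 1
--     return True
-- ===== Notes on version B (the rewrite author's own statement) =====
-- stated objective: faster
-- what changed: Replaces the per-distinct-value counting dicts (each built with a full list.count scan per key) by sorting both lists once and consuming them with a two-pointer merge.
import Mathlib
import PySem

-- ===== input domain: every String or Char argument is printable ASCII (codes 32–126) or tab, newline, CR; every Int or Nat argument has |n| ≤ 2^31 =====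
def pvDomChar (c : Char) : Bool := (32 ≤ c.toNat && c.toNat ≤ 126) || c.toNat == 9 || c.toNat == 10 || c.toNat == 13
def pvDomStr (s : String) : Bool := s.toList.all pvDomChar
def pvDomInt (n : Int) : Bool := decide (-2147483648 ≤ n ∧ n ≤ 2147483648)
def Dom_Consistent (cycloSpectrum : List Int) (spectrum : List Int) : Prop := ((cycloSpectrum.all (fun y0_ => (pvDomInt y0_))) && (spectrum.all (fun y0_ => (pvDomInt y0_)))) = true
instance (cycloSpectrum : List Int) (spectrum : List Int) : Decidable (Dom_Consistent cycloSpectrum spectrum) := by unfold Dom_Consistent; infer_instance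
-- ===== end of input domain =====

-- B sorts both lists once and consumes them with a two-pointer merge instead of A's
-- per-distinct-value counting dicts; proved to return exactly A's value on all inputs.

-- ===== PORT A =====
-- the dict comprehension {s: xs.count(s) for s in set(xs)} (used twice in A)
def countDict (xs : List Int) : PySem.Dict Int Int :=
  (PySem.Set.ofList xs).foldl (fun d k => d.insert k (PySem.List.count xs k)) PySem.Dict.empty

-- the 'for cSpec in cSpecCount.keys(): if … : return False' loop (early return)
def consistentLoop (cCount sCount : PySem.Dict Int Int) (uniq : PySem.Set Int) : List Int → Bool
  | [] => true
  | k :: ks =>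
    if !(PySem.Set.contains uniq k) || decide (cCount.getD k 0 > sCount.getD k 0) then false
    else consistentLoop cCount sCount uniq ks

def Consistent (cycloSpectrum : List Int) (spectrum : List Int) : Bool :=
  let cSpecCount := countDict cycloSpectrum
  let specCount := countDict spectrum
  -- uniqueSpectrum = set(specCount.keys())
  let uniqueSpectrum : PySem.Set Int := PySem.Set.ofList specCount.keys
  consistentLoop cSpecCount specCount uniqueSpectrum cSpecCount.keys

-- ===== PORT B =====
-- the two-pointer scan of Source B: advancing i/j = structural recursion on the two sorted lists
def twoPtr : List Int → List Int → Bool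
  | [], _ => true
  | _ :: _, [] => false
  | a :: cs, b :: ss =>
    if b < a then twoPtr (a :: cs) ss
    else if b = a then twoPtr cs ss
    else false
termination_by cs ss => cs.length + ss.length

def Consistent_alt (cycloSpectrum : List Int) (spectrum : List Int) : Bool :=
  twoPtr (PySem.List.sorted cycloSpectrum (fun x => x) false)
         (PySem.List.sorted spectrum (fun x => x) false)

-- ===== PRECONDITION & SPEC =====
def Spec_Consistent (cycloSpectrum : List Int) (spectrum : List Int) (out : Bool) : Prop := out = Consistent_alt cycloSpectrum spectrum
instance (cycloSpectrum : List Int) (spectrum : List Int) (out : Bool) : Decidable (Spec_Consistent cycloSpectrum spectrum out) := by unfold Spec_Consistent; infer_instance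

-- ===== CLAIM (what is proved, stated in full; the proofs are below) =====
def Claim_equal_Consistent : Prop := ∀ (cycloSpectrum : List Int) (spectrum : List Int), Dom_Consistent cycloSpectrum spectrum → Spec_Consistent cycloSpectrum spectrum (Consistent cycloSpectrum spectrum)

-- ===== LEMMAS AND PROOFS =====

-- A's loop returns true iff every key passes the check
theorem consistentLoop_true_iff (cCount sCount : PySem.Dict Int Int) (uniq : PySem.Set Int)
    (ks : List Int) :
    consistentLoop cCount sCount uniq ks = true ↔
      ∀ k ∈ ks, PySem.Set.contains uniq k = true ∧ cCount.getD k 0 ≤ sCount.getD k 0 := by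
  induction ks with
  | nil => simp [consistentLoop]
  | cons k ks ih =>
    rw [consistentLoop]
    cases hcond : (!(PySem.Set.contains uniq k) || decide (cCount.getD k 0 > sCount.getD k 0)) with
    | true =>
      simp only [Bool.or_eq_true, Bool.not_eq_true', decide_eq_true_eq] at hcond
      simp only [if_true, Bool.false_eq_true, false_iff, not_forall]
      refine ⟨k, List.mem_cons_self, ?_⟩
      intro ⟨h1, h2⟩
      rcases hcond with h | h
      · rw [h1] at h; cases h
      · omega
    | false =>
      simp only [Bool.or_eq_false_iff, Bool.not_eq_false', decide_eq_false_iff_not, not_lt] at hcond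
      simp only [Bool.false_eq_true, if_false, ih]
      constructor
      · intro hall x hx
        rcases List.mem_cons.mp hx with rfl | hx'
        · exact ⟨hcond.1, hcond.2⟩
        · exact hall x hx'
      · intro hall x hx; exact hall x (List.mem_cons_of_mem _ hx)

theorem keys_countDict (xs : List Int) : (countDict xs).keys = PySem.Set.ofList xs := by
  unfold countDict
  rw [PySem.Dict.keys_foldl_insert, PySem.Dict.keys_empty, PySem.Set.update_nil_left,
    PySem.Set.ofList_ofList]

theorem getD_countDict (xs : List Int) (k : Int) (hk : k ∈ PySem.Set.ofList xs) :
    (countDict xs).getD k 0 = (xs.count k : Int) := by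
  have hitems := PySem.Dict.items_foldl_insert_fresh
    (l := PySem.Set.ofList xs) (k := fun x => x)
    (v := fun x => ((PySem.List.count xs x : Nat) : Int)) (d := PySem.Dict.empty)
    (by intro a _; exact PySem.Dict.contains_empty a)
    (by simpa [List.map_id_fun] using PySem.Set.nodup_ofList xs)
  apply PySem.Dict.getD_of_mem_items (d := countDict xs)
  · show (k, (xs.count k : Int)) ∈ (countDict xs).items
    unfold countDict
    rw [hitems]
    simp only [List.mem_append, List.mem_map]
    right
    exact ⟨k, hk, by simp [PySem.List.count_eq]⟩
  · rw [keys_countDict]; exact PySem.Set.nodup_ofList xs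

-- A = true ↔ the count condition over the values of cycloSpectrum
theorem Consistent_true_iff (c s : List Int) :
    Consistent c s = true ↔ ∀ k ∈ c, k ∈ s ∧ c.count k ≤ s.count k := by
  unfold Consistent
  simp only
  rw [consistentLoop_true_iff, keys_countDict, keys_countDict]
  constructor
  · intro hall k hk
    have hk' : k ∈ PySem.Set.ofList c := (PySem.Set.mem_ofList c k).mpr hk
    rcases hall k hk' with ⟨h1, h2⟩
    have hmem : k ∈ s := by
      have := (PySem.Set.contains_iff _ _).mp h1
      rw [PySem.Set.mem_ofList, PySem.Set.mem_ofList] at this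
      exact this
    refine ⟨hmem, ?_⟩
    rw [getD_countDict c k hk', getD_countDict s k ((PySem.Set.mem_ofList s k).mpr hmem)] at h2
    exact_mod_cast h2
  · intro hall k hk
    have hkc : k ∈ c := (PySem.Set.mem_ofList c k).mp hk
    rcases hall k hkc with ⟨hmem, hcnt⟩
    have hk's : k ∈ PySem.Set.ofList (PySem.Set.ofList s) := by
      rw [PySem.Set.mem_ofList, PySem.Set.mem_ofList]; exact hmem
    refine ⟨(PySem.Set.contains_iff _ _).mpr hk's, ?_⟩
    rw [getD_countDict c k hk, getD_countDict s k ((PySem.Set.mem_ofList s k).mpr hmem)]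
    exact_mod_cast hcnt

-- on sorted lists the two-pointer scan decides subpermutation (multiset inclusion)
theorem twoPtr_true_iff (cs ss : List Int)
    (hc : cs.Pairwise (· ≤ ·)) (hs : ss.Pairwise (· ≤ ·)) :
    twoPtr cs ss = true ↔ cs.Subperm ss := by
  induction ss generalizing cs with
  | nil =>
    cases cs with
    | nil => simp [twoPtr]
    | cons a cs' => simp [twoPtr, List.subperm_nil]
  | cons b ss' ih =>
    cases cs with
    | nil => simp [twoPtr, List.nil_subperm]
    | cons a cs' =>
      have hs' : ss'.Pairwise (· ≤ ·) := hs.of_cons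
      by_cases hba : b < a
      · rw [twoPtr, if_pos hba, ih (a :: cs') hc hs']
        constructor
        · intro h; exact h.trans (List.sublist_cons_self b ss').subperm
        · intro h
          rw [List.subperm_ext_iff] at h ⊢
          intro x hx
          have hax : a ≤ x := by
            rcases List.mem_cons.mp hx with rfl | hx'
            · exact le_refl x
            · exact (List.pairwise_cons.mp hc).1 x hx'
          have hxb : x ≠ b := by omega
          have hcount := h x hx
          rwa [List.count_cons_of_ne (id (Ne.symm hxb))] at hcount
      · by_cases hab : b = a
        · subst hab
          rw [twoPtr, if_neg hba, if_pos rfl, ih cs' hc.of_cons hs']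
          exact (List.subperm_cons b).symm
        · have halt : a < b := by omega
          rw [twoPtr, if_neg hba, if_neg hab]
          simp only [Bool.false_eq_true, false_iff]
          intro h
          have ha : a ∈ b :: ss' := h.subset (List.mem_cons_self)
          rcases List.mem_cons.mp ha with rfl | ha'
          · exact hab rfl
          · have : b ≤ a := (List.pairwise_cons.mp hs).1 a ha'
            omega

-- B = true ↔ cycloSpectrum is a sub-multiset of spectrum
theorem Consistent_alt_true_iff (c s : List Int) :
    Consistent_alt c s = true ↔ c.Subperm s := by
  unfold Consistent_alt
  rw [twoPtr_true_iff _ _ (by simpa using PySem.List.sorted_pairwise c (fun x => x))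
      (by simpa using PySem.List.sorted_pairwise s (fun x => x))]
  rw [List.Perm.subperm_right (PySem.List.sorted_perm c (fun x => x) false),
    List.Perm.subperm_left (PySem.List.sorted_perm s (fun x => x) false)]
-- A's count condition is exactly subpermutation
theorem count_cond_iff_subperm (c s : List Int) :
    (∀ k ∈ c, k ∈ s ∧ c.count k ≤ s.count k) ↔ c.Subperm s := by
  rw [List.subperm_ext_iff]
  constructor
  · intro h x hx; exact (h x hx).2
  · intro h x hx
    refine ⟨?_, h x hx⟩
    have h1 : 0 < c.count x := List.count_pos_iff.mpr hx
    have h2 := h x hx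
    exact List.count_pos_iff.mp (by omega)

-- ===== VERDICT (by name: the statement is the Claim_ definition above) =====
theorem Consistent_spec : Claim_equal_Consistent := by
  intro c s _
  unfold Spec_Consistent
  rw [Bool.eq_iff_iff, Consistent_true_iff, Consistent_alt_true_iff]
  exact count_cond_iff_subperm c s
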